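-- pv_equiv track=rewrite | github.com/Shivakant2410/500-Python-Programs | 40 to 60/47 Find common element betweenn list.py | comm_ele_rec
-- ===== SOURCE A (Python) =====
-- def comm_ele_rec(list3, list4):
--     if not list3:
--         return []
--     first =list3[0]
--     rest = comm_ele_rec(list3[1:], list4)
--     if first in list4 and first not in rest:
--         return [first] + rest
--     else:
--         return rest
-- ===== SOURCE B (Python) =====
-- def comm_ele_rec(list3, list4):
--     s4 = set(list4)
--     seen = set()
--     out = []
--     for x in reversed(list3):
--         if x in s4 and x not in seen:
--             out.append(x)
--             seen.add(x)
--     out.reverse()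
--     return out
-- ===== Notes on version B (the rewrite author's own statement) =====
-- stated objective: faster
-- what changed: Replaced the quadratic recursion (linear scans of list4 and of the recursive result at every step) by one right-to-left pass with a set for list4 membership and a seen-set, keeping last occurrences in order.
import Mathlib
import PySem

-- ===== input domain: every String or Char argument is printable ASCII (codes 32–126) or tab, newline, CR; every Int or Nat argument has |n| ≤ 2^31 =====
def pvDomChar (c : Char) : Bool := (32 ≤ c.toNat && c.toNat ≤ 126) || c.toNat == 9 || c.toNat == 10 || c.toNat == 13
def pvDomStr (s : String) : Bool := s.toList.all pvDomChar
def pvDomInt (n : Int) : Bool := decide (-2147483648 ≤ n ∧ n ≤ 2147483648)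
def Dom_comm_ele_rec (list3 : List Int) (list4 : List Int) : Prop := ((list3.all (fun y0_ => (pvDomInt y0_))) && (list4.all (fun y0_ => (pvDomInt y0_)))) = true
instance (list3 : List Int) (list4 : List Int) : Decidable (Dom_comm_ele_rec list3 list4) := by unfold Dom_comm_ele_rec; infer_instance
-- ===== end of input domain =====

-- B replaces A's quadratic recursion by one right-to-left pass with a set for list4
-- membership and a seen-set (objective: faster).

-- ===== PORT A =====
def comm_ele_rec (list3 : List Int) (list4 : List Int) : List Int :=
  match list3 with
  | [] => []
  | first :: tl =>
    let rest := comm_ele_rec tl list4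
    if first ∈ list4 ∧ first ∉ rest then first :: rest else rest

-- ===== PORT B =====
-- loop body of Source B: state = (out, seen); append x and add to seen when x ∈ s4 and unseen
def pvStep (s4 : PySem.Set Int) (st : List Int × PySem.Set Int) (x : Int) : List Int × PySem.Set Int :=
  if x ∈ s4 ∧ x ∉ st.2 then (st.1 ++ [x], PySem.Set.add st.2 x) else st

def comm_ele_rec_alt (list3 : List Int) (list4 : List Int) : List Int :=
  let s4 := PySem.Set.ofList list4
  let st := list3.reverse.foldl (pvStep s4) (([] : List Int), (PySem.Set.empty : PySem.Set Int))
  st.1.reverse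

-- ===== PRECONDITION & SPEC =====
def Spec_comm_ele_rec (list3 : List Int) (list4 : List Int) (out : List Int) : Prop := out = comm_ele_rec_alt list3 list4
instance (list3 : List Int) (list4 : List Int) (out : List Int) : Decidable (Spec_comm_ele_rec list3 list4 out) := by unfold Spec_comm_ele_rec; infer_instance

-- ===== CLAIM (what is proved, stated in full; the proofs are below) =====
def Claim_equal_comm_ele_rec : Prop := ∀ (list3 : List Int) (list4 : List Int), Dom_comm_ele_rec list3 list4 → Spec_comm_ele_rec list3 list4 (comm_ele_rec list3 list4)

-- ===== LEMMAS AND PROOFS =====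
-- Loop invariant: after folding list3 right-to-left, out is A's result reversed and
-- seen holds exactly the elements of A's result.
lemma comm_loop_inv (list4 : List Int) (l3 : List Int) :
    (l3.reverse.foldl (pvStep (PySem.Set.ofList list4)) (([] : List Int), (PySem.Set.empty : PySem.Set Int))).1
      = (comm_ele_rec l3 list4).reverse
    ∧ ∀ y, (y ∈ (l3.reverse.foldl (pvStep (PySem.Set.ofList list4)) (([] : List Int), (PySem.Set.empty : PySem.Set Int))).2
            ↔ y ∈ comm_ele_rec l3 list4) := by
  induction l3 with
  | nil => simp [comm_ele_rec, PySem.Set.empty]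
  | cons x xs ih =>
    obtain ⟨h1, h2⟩ := ih
    rw [List.reverse_cons, List.foldl_append, List.foldl_cons, List.foldl_nil]
    set st := xs.reverse.foldl (pvStep (PySem.Set.ofList list4)) (([] : List Int), (PySem.Set.empty : PySem.Set Int)) with hst
    clear hst
    have hmem : (x ∈ PySem.Set.ofList list4 ∧ x ∉ st.2)
        ↔ (x ∈ list4 ∧ x ∉ comm_ele_rec xs list4) := by
      rw [PySem.Set.mem_ofList, h2]
    by_cases hc : x ∈ list4 ∧ x ∉ comm_ele_rec xs list4
    · rw [pvStep, if_pos (hmem.mpr hc)]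
      refine ⟨?_, fun y => ?_⟩
      · simp [comm_ele_rec, hc, h1]
      · simp [comm_ele_rec, hc, PySem.Set.mem_add, h2 y, or_comm]
    · rw [pvStep, if_neg (fun h => hc (hmem.mp h))]
      refine ⟨?_, fun y => ?_⟩
      · simp [comm_ele_rec, hc, h1]
      · simp [comm_ele_rec, hc, h2 y]

-- ===== VERDICT (by name: the statement is the Claim_ definition above) =====
theorem comm_ele_rec_spec : Claim_equal_comm_ele_rec := by
  intro list3 list4 _
  unfold Spec_comm_ele_rec
  show comm_ele_rec list3 list4
      = (list3.reverse.foldl (pvStep (PySem.Set.ofList list4)) (([] : List Int), (PySem.Set.empty : PySem.Set Int))).1.reverse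
  rw [(comm_loop_inv list4 list3).1, List.reverse_reverse]
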